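-- pv_equiv track=rewrite | github.com/ricardobarbieri/midi_generator_advanced_GUI | midi_generator_advanced_GUI.py | get_harmonic_suggestions
-- ===== SOURCE A (Python) =====
-- NOTE_NAMES = ['C', 'C#', 'D', 'D#', 'E', 'F', 'F#', 'G', 'G#', 'A', 'A#', 'B']
--
-- BASE_NOTES = {name: i for i, name in enumerate(NOTE_NAMES)}
--
-- CIRCLE_OF_FIFTHS = [0, 7, 2, 9, 4, 11, 6, 1, 8, 3, 10, 5]  # C, G, D, A, E, B, F#, C#, G#, D#, A#, F
--
-- def get_harmonic_suggestions(current_note_name, mode):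
--     # Encontra o índice da nota atual no círculo de quintas
--     current_note_idx = BASE_NOTES[current_note_name]
--     circle_idx = CIRCLE_OF_FIFTHS.index(current_note_idx)
--
--     # Gera sugestões de notas próximas no círculo de quintas
--     suggestions = []
--     for offset in [-1, 1, -2, 2]:  # Verifica notas adjacentes e próximas no círculo
--         suggestion_idx = (circle_idx + offset) % 12
--         suggestion_note = NOTE_NAMES[CIRCLE_OF_FIFTHS[suggestion_idx]]
--         # Sugere o modo mais comum baseado no modo atual
--         suggested_mode = 'Major (Ionian)' if 'Major' in mode or 'Lydian' in mode or 'Mixolydian' in mode else 'Minor (Aeolian)'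
--         suggestions.append(f"{suggestion_note} ({suggested_mode})")
--
--     return suggestions
-- ===== SOURCE B (Python) =====
-- NOTE_NAMES = ['C', 'C#', 'D', 'D#', 'E', 'F', 'F#', 'G', 'G#', 'A', 'A#', 'B']
--
-- BASE_NOTES = {name: i for i, name in enumerate(NOTE_NAMES)}
--
--
-- def get_harmonic_suggestions(current_note_name, mode):
--     # One step around the circle of fifths is +7 semitones mod 12, so the
--     # CIRCLE_OF_FIFTHS table and the .index() scan are unnecessary.
--     n = BASE_NOTES[current_note_name]
--     suggested_mode = ('Major (Ionian)'
--                       if 'Major' in mode or 'Lydian' in mode or 'Mixolydian' in mode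
--                       else 'Minor (Aeolian)')
--     return [f"{NOTE_NAMES[(n + 7 * offset) % 12]} ({suggested_mode})"
--             for offset in (-1, 1, -2, 2)]
-- ===== Notes on version B (the rewrite author's own statement) =====
-- stated objective: simpler
-- what changed: Replaces the CIRCLE_OF_FIFTHS lookup table and the .index() scan by the closed-form step (n + 7*offset) % 12, and hoists the mode string out of the loop; B matches A exactly on note names present in BASE_NOTES (Pre_ excludes only names on which A raises KeyError).
import Mathlib
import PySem

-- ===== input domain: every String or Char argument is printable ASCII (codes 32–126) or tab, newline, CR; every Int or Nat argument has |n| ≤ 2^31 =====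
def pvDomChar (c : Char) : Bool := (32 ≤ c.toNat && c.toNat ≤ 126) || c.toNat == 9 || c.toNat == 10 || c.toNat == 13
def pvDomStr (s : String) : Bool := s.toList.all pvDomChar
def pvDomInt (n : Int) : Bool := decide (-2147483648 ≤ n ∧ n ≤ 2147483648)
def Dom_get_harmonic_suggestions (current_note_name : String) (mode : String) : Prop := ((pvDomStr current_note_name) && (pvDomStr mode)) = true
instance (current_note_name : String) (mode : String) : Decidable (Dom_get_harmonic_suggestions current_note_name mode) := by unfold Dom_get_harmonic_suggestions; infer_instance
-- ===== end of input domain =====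

-- B removes the CIRCLE_OF_FIFTHS table and its .index() scan in favour of the closed-form
-- step (n + 7*offset) % 12 and hoists the mode string out of the loop (objective: simpler).

-- ===== PORT A =====
def noteNames : List String := ["C", "C#", "D", "D#", "E", "F", "F#", "G", "G#", "A", "A#", "B"]

-- BASE_NOTES = {name: i for i, name in enumerate(NOTE_NAMES)}
def baseNotes : PySem.Dict String Int :=
  (PySem.List.enumerate noteNames).foldl (fun d p => d.insert p.2 p.1) PySem.Dict.empty

def circleOfFifths : List Int := [0, 7, 2, 9, 4, 11, 6, 1, 8, 3, 10, 5]

def get_harmonic_suggestions (current_note_name : String) (mode : String) : List String :=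
  match baseNotes.get? current_note_name with
  | none => []        -- KeyError in Python; excluded by Pre_
  | some current_note_idx =>
    match PySem.List.index? circleOfFifths current_note_idx with
    | none => []      -- unreachable: every value 0..11 occurs in circleOfFifths
    | some circle_idx =>
      ([-1, 1, -2, 2] : List Int).foldl (fun suggestions offset =>
        let suggestion_idx := PySem.Int.mod ((circle_idx : Int) + offset) 12
        -- both indices are provably in range (mod 12 of the sum is in [0,12)), so getD is never hit
        let suggestion_note :=
          (PySem.List.pyGet? noteNames ((PySem.List.pyGet? circleOfFifths suggestion_idx).getD 0)).getD ""
        let suggested_mode :=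
          if PySem.Str.isIn "Major" mode || PySem.Str.isIn "Lydian" mode || PySem.Str.isIn "Mixolydian" mode
          then "Major (Ionian)" else "Minor (Aeolian)"
        suggestions ++ [suggestion_note ++ " (" ++ suggested_mode ++ ")"]) []

-- ===== PORT B =====
def get_harmonic_suggestions_alt (current_note_name : String) (mode : String) : List String :=
  match baseNotes.get? current_note_name with
  | none => []        -- KeyError in Python; excluded by Pre_
  | some n =>
    let suggested_mode :=
      if PySem.Str.isIn "Major" mode || PySem.Str.isIn "Lydian" mode || PySem.Str.isIn "Mixolydian" mode
      then "Major (Ionian)" else "Minor (Aeolian)"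
    ([-1, 1, -2, 2] : List Int).map (fun offset =>
      (PySem.List.pyGet? noteNames (PySem.Int.mod (n + 7 * offset) 12)).getD "" ++ " (" ++ suggested_mode ++ ")")

-- ===== PRECONDITION & SPEC =====
-- Pre_ excludes exactly the note names absent from BASE_NOTES, on which Python A raises KeyError.
def Pre_get_harmonic_suggestions (current_note_name : String) (mode : String) : Prop :=
  current_note_name ∈ (["C", "C#", "D", "D#", "E", "F", "F#", "G", "G#", "A", "A#", "B"] : List String)
instance (current_note_name : String) (mode : String) : Decidable (Pre_get_harmonic_suggestions current_note_name mode) := by unfold Pre_get_harmonic_suggestions; infer_instance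

def pvWitness_get_harmonic_suggestions : String × String := ("C", "Major")

def Spec_get_harmonic_suggestions (current_note_name : String) (mode : String) (out : List String) : Prop := out = get_harmonic_suggestions_alt current_note_name mode
instance (current_note_name : String) (mode : String) (out : List String) : Decidable (Spec_get_harmonic_suggestions current_note_name mode out) := by unfold Spec_get_harmonic_suggestions; infer_instance

-- ===== CLAIM (what is proved, stated in full; the proofs are below) =====
def Claim_equal_get_harmonic_suggestions : Prop := ∀ (current_note_name : String) (mode : String), Dom_get_harmonic_suggestions current_note_name mode → Pre_get_harmonic_suggestions current_note_name mode → Spec_get_harmonic_suggestions current_note_name mode (get_harmonic_suggestions current_note_name mode)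

-- ===== LEMMAS AND PROOFS =====

-- ===== VERDICT (by name: the statement is the Claim_ definition above) =====
theorem get_harmonic_suggestions_spec : Claim_equal_get_harmonic_suggestions := by
  intro current_note_name mode _ hpre
  unfold Pre_get_harmonic_suggestions at hpre
  unfold Spec_get_harmonic_suggestions
  simp only [List.mem_cons, List.not_mem_nil, or_false] at hpre
  rcases hpre with h|h|h|h|h|h|h|h|h|h|h|h <;> subst h <;> rfl
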